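-- pv_equiv track=rewrite | github.com/bica-tools/reticulate | reticulate/polarity.py | label_closure
-- ===== SOURCE A (Python) =====
-- def label_closure(states: frozenset[int], relation: dict[int, frozenset[str]]) -> frozenset[str]:
--     """↑-closure: labels enabled at ALL given states.
--
--     label_closure(A) = ⋂{R(s) | s ∈ A}
--     For the empty set of states, returns all labels.
--     """
--     if not states:
--         all_labs: set[str] = set()
--         for labs in relation.values():
--             all_labs |= labs
--         return frozenset(all_labs)
--     result: frozenset[str] | None = None
--     for s in states:
--         s_labels = relation.get(s, frozenset())
--         if result is None:
--             result = s_labels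
--         else:
--             result = result & s_labels
--     return result if result is not None else frozenset()
-- ===== SOURCE B (Python) =====
-- def label_closure(states, relation):
--     if not states:
--         return frozenset(lab for labs in relation.values() for lab in labs)
--     cnt = {}
--     for s in states:
--         for lab in relation.get(s, frozenset()):
--             cnt[lab] = cnt.get(lab, 0) + 1
--     n = len(states)
--     return frozenset(lab for lab, c in cnt.items() if c == n)
-- ===== Notes on version B (the rewrite author's own statement) =====
-- stated objective: alternative
-- what changed: Replaces A's iterative pairwise frozenset intersections with a single frequency-count pass over all states' label sets followed by a filter keeping labels whose count equals len(states); the empty-states union branch becomes one flattening comprehension.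
import Mathlib
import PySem

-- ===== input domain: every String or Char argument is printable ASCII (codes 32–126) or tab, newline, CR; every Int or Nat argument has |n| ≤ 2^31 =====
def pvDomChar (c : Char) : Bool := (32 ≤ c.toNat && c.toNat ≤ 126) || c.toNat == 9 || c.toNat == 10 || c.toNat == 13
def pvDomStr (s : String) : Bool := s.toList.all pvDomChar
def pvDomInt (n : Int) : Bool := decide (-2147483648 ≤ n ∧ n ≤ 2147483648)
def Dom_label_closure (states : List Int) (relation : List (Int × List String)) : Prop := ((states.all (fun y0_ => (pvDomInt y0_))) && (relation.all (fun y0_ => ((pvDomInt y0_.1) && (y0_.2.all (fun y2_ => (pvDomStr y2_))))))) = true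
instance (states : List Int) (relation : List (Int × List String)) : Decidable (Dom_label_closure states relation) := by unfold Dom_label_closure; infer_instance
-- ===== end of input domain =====

-- B replaces A's iterative pairwise set intersections by one frequency-count pass plus a
-- count = len(states) filter (different decomposition, same cost); equivalence on the return value.

-- ===== PORT A =====
def label_closure (states : List Int) (relation : List (Int × List String)) : List String :=
  if states = [] then
    (PySem.Dict.mk relation).values.foldl
      (fun (all_labs : PySem.Set String) labs => PySem.Set.update all_labs labs)
      PySem.Set.empty
  else
    (states.foldl
      (fun (result : Option (List String)) s =>
        let s_labels := (PySem.Dict.mk relation).getD s []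
        match result with
        | none => some s_labels
        | some r => some (PySem.Set.inter r s_labels))
      none).getD []

-- ===== PORT B =====
def label_closure_alt (states : List Int) (relation : List (Int × List String)) : List String :=
  if states = [] then
    PySem.Set.ofList ((PySem.Dict.mk relation).values.flatMap (fun labs => labs))
  else
    let cnt : PySem.Dict String Int :=
      states.foldl
        (fun d s =>
          ((PySem.Dict.mk relation).getD s []).foldl
            (fun d lab => d.insert lab (d.getD lab 0 + 1)) d)
        PySem.Dict.empty
    let n : Int := (states.length : Int)
    PySem.Set.ofList ((cnt.items.filter (fun kc => kc.2 = n)).map (fun kc => kc.1))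

-- ===== PRECONDITION & SPEC =====
-- The label lists in `relation` encode Python frozensets, whose list encoding has no duplicate
-- elements; Pre_ admits exactly these valid encodings (a duplicated label would make no sense as
-- a frozenset and would inflate B's per-state counts).
def Pre_label_closure (states : List Int) (relation : List (Int × List String)) : Prop :=
  ∀ kv ∈ relation, kv.2.Nodup
instance (states : List Int) (relation : List (Int × List String)) : Decidable (Pre_label_closure states relation) := by unfold Pre_label_closure; infer_instance

def pvWitness_label_closure : List Int × (List (Int × List String)) :=
  ([1, 2], [(1, ["a", "b"]), (2, ["b", "c"])])

def Spec_label_closure (states : List Int) (relation : List (Int × List String)) (out : List String) : Prop := out = label_closure_alt states relation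
instance (states : List Int) (relation : List (Int × List String)) (out : List String) : Decidable (Spec_label_closure states relation out) := by unfold Spec_label_closure; infer_instance

-- ===== CLAIM (what is proved, stated in full; the proofs are below) =====
def Claim_equal_label_closure : Prop := ∀ (states : List Int) (relation : List (Int × List String)), Dom_label_closure states relation → Pre_label_closure states relation → Spec_label_closure states relation (label_closure states relation)

-- ===== LEMMAS AND PROOFS =====

-- A's intersection loop, after the first state, filters the running list by each later state.
theorem pvA_fold (L : Int → List String) (rest : List Int) (r : List String) :
    rest.foldl
      (fun (result : Option (List String)) s =>
        match result with
        | none => some (L s)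
        | some r => some (PySem.Set.inter r (L s)))
      (some r)
    = some (r.filter (fun lab => rest.all (fun t => PySem.Set.contains (L t) lab))) := by
  induction rest generalizing r with
  | nil => simp
  | cons t rest ih =>
    simp only [List.foldl_cons, ih, List.all_cons]
    refine congrArg some ?_
    show (r.filter (fun lab => PySem.Set.contains (L t) lab)).filter _ = _
    rw [List.filter_filter]
    exact List.filter_congr (fun lab _ => by rw [Bool.and_comm])

-- a nested accumulator loop is the loop over the flattened list
theorem pvFoldl_flatMap {α β γ : Type} (xs : List α) (f : α → List β) (g : γ → β → γ) (init : γ) :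
    xs.foldl (fun d a => (f a).foldl g d) init = (xs.flatMap f).foldl g init := by
  induction xs generalizing init with
  | nil => rfl
  | cons x xs ih => simp [List.flatMap_cons, List.foldl_append, ih]

-- a label's per-state counts are each at most one, so the flattened count is at most |states|
theorem pvCount_le (L : Int → List String) (states : List Int)
    (hnd : ∀ s ∈ states, (L s).Nodup) (lab : String) :
    (states.flatMap L).count lab ≤ states.length := by
  induction states with
  | nil => simp
  | cons t rest ih =>
    have h1 : (L t).count lab ≤ 1 :=
      List.nodup_iff_count_le_one.mp (hnd t (by simp)) lab
    have h2 := ih (fun u hu => hnd u (by simp [hu]))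
    simp only [List.flatMap_cons, List.count_append, List.length_cons]
    omega

-- a label's total count over the flattened per-state label sets reaches the number of states
-- exactly when every state's set contains it (each set being duplicate-free)
theorem pvCount_flat (L : Int → List String) (states : List Int)
    (hnd : ∀ s ∈ states, (L s).Nodup) (lab : String) :
    (states.flatMap L).count lab = states.length ↔ ∀ s ∈ states, lab ∈ L s := by
  induction states with
  | nil => simp
  | cons s rest ih =>
    have hs : (L s).Nodup := hnd s (by simp)
    have h1 : (L s).count lab ≤ 1 := List.nodup_iff_count_le_one.mp hs lab
    have hmem : lab ∈ L s ↔ 0 < (L s).count lab := (List.count_pos_iff).symm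
    have hrest := ih (fun t ht => hnd t (by simp [ht]))
    have hle : (rest.flatMap L).count lab ≤ rest.length :=
      pvCount_le L rest (fun t ht => hnd t (by simp [ht])) lab
    simp only [List.flatMap_cons, List.count_append, List.length_cons, List.mem_cons]
    constructor
    · intro h
      have hrc : (rest.flatMap L).count lab = rest.length := by omega
      intro t ht
      rcases ht with rfl | ht
      · exact hmem.mpr (by omega)
      · exact (hrest.mp hrc) t ht
    · intro h
      have hsc : 0 < (L s).count lab := hmem.mp (h s (Or.inl rfl))
      have hrc : (rest.flatMap L).count lab = rest.length :=
        hrest.mpr (fun t ht => h t (Or.inr ht))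
      omega

-- filtering a Set.update by a predicate that only holds inside the base set ignores the update
theorem pvFilter_update (u : List String) (b : List String) (P : String → Bool)
    (h : ∀ x, P x = true → x ∈ u) :
    (PySem.Set.update u b).filter P = u.filter P := by
  induction b generalizing u with
  | nil => simp [PySem.Set.update_nil]
  | cons x b ih =>
    rw [PySem.Set.update_cons]
    by_cases hx : x ∈ u
    · rw [PySem.Set.add_of_mem hx]; exact ih u h
    · rw [PySem.Set.add_of_not_mem hx]
      have hPx : P x = false := by
        cases hPx : P x
        · rfl
        · exact absurd (h x hPx) hx
      have h' : ∀ y, P y = true → y ∈ u ++ [x] := fun y hy => by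
        simp [h y hy]
      rw [ih (u ++ [x]) h', List.filter_append]
      simp [hPx]

-- the union loop of A's empty-states branch builds set(flatten(values))
theorem pvUnion_loop (ls : List (List String)) (acc : PySem.Set String) :
    ls.foldl (fun (a : PySem.Set String) l => PySem.Set.update a l) acc
      = PySem.Set.update acc (ls.flatMap (fun l => l)) := by
  induction ls generalizing acc with
  | nil => simp [PySem.Set.update_nil]
  | cons l ls ih => simp [List.flatMap_cons, PySem.Set.update_append, ih]

theorem label_closure_eq (states : List Int) (relation : List (Int × List String))
    (hpre : Pre_label_closure states relation) :
    label_closure states relation = label_closure_alt states relation := by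
  unfold label_closure label_closure_alt
  by_cases hse : states = []
  · rw [if_pos hse, if_pos hse, pvUnion_loop]
    exact (PySem.Set.update_nil_left _)
  · simp only [if_neg hse]
    set L : Int → List String := fun s => (PySem.Dict.mk relation).getD s []
    have hLnd : ∀ s, (L s).Nodup := by
      intro s
      show ((PySem.Dict.mk relation).getD s []).Nodup
      rcases hget : (PySem.Dict.mk relation).get? s with _ | v
      · simp [PySem.Dict.getD_eq_get?_getD, hget]
      · rw [PySem.Dict.getD_eq_get?_getD, hget, Option.getD_some]
        have hv : (s, v) ∈ (PySem.Dict.mk relation).items :=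
          PySem.Dict.mem_items_of_get?_eq_some _ hget
        exact hpre (s, v) hv
    obtain ⟨s0, rest, rfl⟩ := List.exists_cons_of_ne_nil hse
    -- A's side
    rw [List.foldl_cons]
    show (List.foldl _ (some (L s0)) rest).getD [] = _
    rw [pvA_fold L rest (L s0), Option.getD_some]
    -- B's side: the nested counting loop is Counter(flattened labels)
    rw [show (s0 :: rest).foldl
          (fun (d : PySem.Dict String Int) s =>
            (L s).foldl (fun d lab => d.insert lab (d.getD lab 0 + 1)) d)
          PySem.Dict.empty
        = PySem.Dict.counter ((s0 :: rest).flatMap L) from by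
      rw [pvFoldl_flatMap]
      exact PySem.Dict.foldl_insert_getD_add_one_eq_counter _]
    set flat := (s0 :: rest).flatMap L with hflat
    set n : Int := ((s0 :: rest).length : Int) with hn
    rw [PySem.Dict.items_counter, List.filter_map, List.map_map]
    set P : String → Bool := fun k => decide ((flat.count k : Int) = n) with hP
    have hcomp : ((fun kc : String × Int => decide (kc.2 = n)) ∘
        fun k => (k, (flat.count k : Int))) = P := by
      funext k; simp [hP]
    rw [hcomp]
    have hmapfst : ((fun kc : String × Int => kc.1) ∘ fun k => (k, (flat.count k : Int)))
        = fun k : String => k := rfl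
    rw [hmapfst, List.map_id']
    -- the surviving labels all lie in the first state's set
    have hPmem : ∀ x, P x = true → x ∈ L s0 := by
      intro x hx
      rw [hP] at hx
      have : (flat.count x : Int) = n := of_decide_eq_true hx
      have hcnt : flat.count x = (s0 :: rest).length := by
        rw [hn] at this; exact_mod_cast this
      exact ((pvCount_flat L (s0 :: rest) (fun s _ => hLnd s) x).mp hcnt) s0 (by simp)
    have hflat_split : flat = L s0 ++ rest.flatMap L := by simp [hflat]
    rw [hflat_split, PySem.Set.ofList_append,
        PySem.Set.ofList_eq_self_of_nodup _ (hLnd s0),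
        pvFilter_update (L s0) _ P hPmem,
        PySem.Set.ofList_eq_self_of_nodup _ (List.Nodup.filter P (hLnd s0))]
    -- on members of L s0 the count test is A's all-membership test
    refine (List.filter_congr ?_).symm
    intro lab hlab
    have hiff : ((flat.count lab : Int) = n) ↔ (∀ s ∈ s0 :: rest, lab ∈ L s) := by
      rw [hn, Int.natCast_inj]
      exact pvCount_flat L (s0 :: rest) (fun s _ => hLnd s) lab
    rw [hP]
    show decide ((flat.count lab : Int) = n) = rest.all fun t => PySem.Set.contains (L t) lab
    rw [show (decide ((flat.count lab : Int) = n))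
          = decide (∀ s ∈ s0 :: rest, lab ∈ L s) from decide_eq_decide.mpr hiff]
    rw [Bool.eq_iff_iff]
    simp [List.all_eq_true]
    exact fun _ => hlab

-- ===== VERDICT (by name: the statement is the Claim_ definition above) =====
theorem label_closure_spec : Claim_equal_label_closure := by
  intro states relation _ hpre
  unfold Spec_label_closure
  exact label_closure_eq states relation hpre
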